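-- pv_equiv track=rewrite | github.com/SKMonarch/Push-Pull | python/intercalar_mayus_minus.py | intercalar_mayus_minus
-- ===== SOURCE A (Python) =====
-- def intercalar_mayus_minus(cadena):
--     resultado = ""
--     mayus = True  # Empezamos con mayúscula
--
--     for letra in cadena:
--         if letra.isalpha():  # Solo procesamos letras
--             if mayus:
--                 resultado += letra.upper()
--             else:
--                 resultado += letra.lower()
--             mayus = not mayus
--         else:
--             resultado += letra  # Mantenemos caracteres no alfabéticos
--
--     return resultado
-- ===== SOURCE B (Python) =====
-- def intercalar_mayus_minus(cadena):
--     chars = list(cadena)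
--     positions = [i for i, c in enumerate(chars) if c.isalpha()]
--     for k, i in enumerate(positions):
--         chars[i] = chars[i].upper() if k % 2 == 0 else chars[i].lower()
--     return ''.join(chars)
-- ===== Notes on version B (the rewrite author's own statement) =====
-- stated objective: alternative
-- what changed: Replaces A's single stateful scan that appends to a growing string with a two-pass scheme: first collect the indices of the alphabetic characters, then rewrite the character list in place at those positions only, using the position's rank parity to pick the case.
import Mathlib
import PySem

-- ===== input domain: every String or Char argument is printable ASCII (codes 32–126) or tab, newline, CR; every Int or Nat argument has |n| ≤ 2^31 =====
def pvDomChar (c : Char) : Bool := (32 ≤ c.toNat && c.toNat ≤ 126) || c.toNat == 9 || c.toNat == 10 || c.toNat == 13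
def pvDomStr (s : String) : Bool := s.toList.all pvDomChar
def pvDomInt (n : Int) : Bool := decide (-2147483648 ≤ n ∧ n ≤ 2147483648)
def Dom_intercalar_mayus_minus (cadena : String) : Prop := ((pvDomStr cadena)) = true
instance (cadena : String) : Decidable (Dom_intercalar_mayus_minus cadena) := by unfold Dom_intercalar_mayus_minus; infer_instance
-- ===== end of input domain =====

-- B replaces A's single stateful append-scan by two passes (collect alphabetic positions, then
-- rewrite the list at those positions by rank parity); objective: alternative decomposition.

-- ===== PORT A =====
def intercalar_mayus_minus (cadena : String) : String :=
  (cadena.toList.foldl (fun (st : String × Bool) letra =>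
    if PySem.Chars.isalpha letra then
      ((if st.2 then st.1.push (PySem.Chars.upperChar letra)
        else st.1.push (PySem.Chars.lowerChar letra)), !st.2)
    else (st.1.push letra, st.2)) ("", true)).1

-- ===== PORT B =====
def intercalar_mayus_minus_alt (cadena : String) : String :=
  let chars := cadena.toList
  let positions := (PySem.List.enumerate chars 0).filterMap
    (fun p => if PySem.Chars.isalpha p.2 then some p.1 else none)
  -- `for k, i in enumerate(positions)`: fold over positions with the counter k in the state
  let st := positions.foldl (fun (st : List Char × Nat) i =>
      (st.1.set i.toNat
        (if st.2 % 2 == 0 then PySem.Chars.upperChar (st.1.getD i.toNat ' ')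
         else PySem.Chars.lowerChar (st.1.getD i.toNat ' ')), st.2 + 1))
    (chars, 0)
  String.ofList st.1

-- ===== PRECONDITION & SPEC =====
def Spec_intercalar_mayus_minus (cadena : String) (out : String) : Prop := out = intercalar_mayus_minus_alt cadena
instance (cadena : String) (out : String) : Decidable (Spec_intercalar_mayus_minus cadena out) := by unfold Spec_intercalar_mayus_minus; infer_instance

-- ===== CLAIM (what is proved, stated in full; the proofs are below) =====
def Claim_equal_intercalar_mayus_minus : Prop := ∀ (cadena : String), Dom_intercalar_mayus_minus cadena → Spec_intercalar_mayus_minus cadena (intercalar_mayus_minus cadena)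

-- ===== LEMMAS AND PROOFS =====

-- common recursive description of the alternating-case map
def pvRun : List Char → Bool → List Char
  | [], _ => []
  | c :: cs, m =>
    if PySem.Chars.isalpha c then
      (if m then PySem.Chars.upperChar c else PySem.Chars.lowerChar c) :: pvRun cs (!m)
    else c :: pvRun cs m

-- positions of the alphabetic characters (Nat form)
def pvPos : List Char → List Nat
  | [] => []
  | c :: cs =>
    if PySem.Chars.isalpha c then 0 :: (pvPos cs).map (· + 1) else (pvPos cs).map (· + 1)

-- the Nat-level body of B's second loop
def pvStep (st : List Char × Nat) (i : Nat) : List Char × Nat :=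
  (st.1.set i
    (if st.2 % 2 == 0 then PySem.Chars.upperChar (st.1.getD i ' ')
     else PySem.Chars.lowerChar (st.1.getD i ' ')), st.2 + 1)

lemma pvA_run (cs : List Char) : ∀ (s : String) (m : Bool),
    ((cs.foldl (fun (st : String × Bool) letra =>
      if PySem.Chars.isalpha letra then
        ((if st.2 then st.1.push (PySem.Chars.upperChar letra)
          else st.1.push (PySem.Chars.lowerChar letra)), !st.2)
      else (st.1.push letra, st.2)) (s, m)).1).toList = s.toList ++ pvRun cs m := by
  induction cs with
  | nil => intro s m; simp [pvRun]
  | cons c cs ih =>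
    intro s m
    by_cases h : PySem.Chars.isalpha c
    · cases m <;> simp [pvRun, h, List.foldl_cons, ih]
    · simp [pvRun, h, List.foldl_cons, ih]

lemma pvPositions_eq (cs : List Char) : ∀ (k : Nat),
    (PySem.List.enumerate cs (k : Int)).filterMap
      (fun p => if PySem.Chars.isalpha p.2 then some p.1 else none)
    = (pvPos cs).map (fun (n : Nat) => ((n : Int) + k)) := by
  induction cs with
  | nil => intro k; simp [PySem.List.enumerate_nil, pvPos]
  | cons c cs ih =>
    intro k
    have h1 : ((k : Int) + 1) = ((k + 1 : Nat) : Int) := by push_cast; ring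
    by_cases h : PySem.Chars.isalpha c
    · rw [PySem.List.enumerate_cons, List.filterMap_cons, h1, pvPos]
      simp only [h, if_true, ih (k + 1), List.map_cons, List.map_map]
      refine congrArg₂ List.cons (by push_cast; ring) ?_
      apply List.map_congr_left; intro n _
      simp only [Function.comp_apply]; push_cast; ring
    · rw [PySem.List.enumerate_cons, List.filterMap_cons, h1, pvPos]
      simp only [h, if_false, Bool.false_eq_true, ih (k + 1), List.map_map]
      apply List.map_congr_left; intro n _
      simp only [Function.comp_apply]; push_cast; ring

-- B's Int-indexed fold over cast positions is the Nat fold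
lemma pvFold_cast (ps : List Nat) (st : List Char × Nat) :
    (ps.map (fun (n : Nat) => ((n : Int) + 0))).foldl (fun (st : List Char × Nat) i =>
      (st.1.set i.toNat
        (if st.2 % 2 == 0 then PySem.Chars.upperChar (st.1.getD i.toNat ' ')
         else PySem.Chars.lowerChar (st.1.getD i.toNat ' ')), st.2 + 1)) st
    = ps.foldl pvStep st := by
  rw [List.foldl_map]
  apply List.foldl_ext
  intro st n _
  simp [pvStep]

-- shifting every position by one skips the head of the list
lemma pvFold_shift (ps : List Nat) : ∀ (c : Char) (cs : List Char) (k : Nat),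
    ((ps.map (· + 1)).foldl pvStep (c :: cs, k)).1
    = c :: (ps.foldl pvStep (cs, k)).1 ∧
    ((ps.map (· + 1)).foldl pvStep (c :: cs, k)).2 = (ps.foldl pvStep (cs, k)).2 := by
  induction ps with
  | nil => intro c cs k; simp
  | cons p ps ih =>
    intro c cs k
    simpa [pvStep] using ih c (cs.set p _) (k + 1)

lemma pvParity (k : Nat) : ((k + 1) % 2 == 0) = !(k % 2 == 0) := by
  rcases Nat.mod_two_eq_zero_or_one k with h | h <;> simp [Nat.add_mod, h]

lemma pvB_run (cs : List Char) : ∀ (k : Nat),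
    ((pvPos cs).foldl pvStep (cs, k)).1 = pvRun cs (k % 2 == 0) := by
  induction cs with
  | nil => intro k; simp [pvPos, pvRun]
  | cons c cs ih =>
    intro k
    by_cases h : PySem.Chars.isalpha c
    · simp only [pvPos, pvRun, h, if_pos, List.foldl_cons]
      have hstep : pvStep (c :: cs, k) 0
          = ((if k % 2 == 0 then PySem.Chars.upperChar c else PySem.Chars.lowerChar c) :: cs,
             k + 1) := by
        by_cases hk : k % 2 == 0 <;> simp [pvStep, hk]
      rw [hstep, (pvFold_shift (pvPos cs) _ cs (k + 1)).1, ih (k + 1), pvParity]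
    · simp only [pvPos, pvRun, h, if_neg, Bool.false_eq_true, not_false_iff]
      rw [(pvFold_shift (pvPos cs) c cs k).1, ih k]

-- ===== VERDICT (by name: the statement is the Claim_ definition above) =====
theorem intercalar_mayus_minus_spec : Claim_equal_intercalar_mayus_minus := by
  intro cadena _
  unfold Spec_intercalar_mayus_minus
  apply String.toList_injective
  have hp := pvPositions_eq cadena.toList 0
  rw [Nat.cast_zero] at hp
  simp only [intercalar_mayus_minus, intercalar_mayus_minus_alt]
  rw [pvA_run, hp, pvFold_cast, pvB_run]
  simp
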